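-- pv_equiv track=rewrite | github.com/shanyongxue/ontology_graph_KGQA | src/utils/graph_utils.py | get_paths_from_relations
-- ===== SOURCE A (Python) =====
-- def get_paths_from_relations(rel_sep, rel2pair):
--     if not rel_sep:
--         return []
--
--     rels = [str(r).strip() for r in (list(rel_sep) if isinstance(rel_sep, (list, tuple)) else [rel_sep])]
--     first_rel = rels[0]
--     if first_rel not in rel2pair:
--         return []
--
--     head, tail = rel2pair[first_rel]
--     seq = [head, first_rel, tail]
--     cur_type = tail
--
--     for r in rels[1:]:
--         pair = rel2pair.get(r)
--         if pair is None:
--             return []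
--         h, t = pair
--         if h != cur_type:
--             return []
--         seq += [r, t]
--         cur_type = t
--
--     return [seq]
-- ===== SOURCE B (Python) =====
-- def get_paths_from_relations(rel_sep, rel2pair):
--     if not rel_sep:
--         return []
--
--     rels = [str(r).strip() for r in (list(rel_sep) if isinstance(rel_sep, (list, tuple)) else [rel_sep])]
--
--     # Traverse the chain RIGHT-TO-LEFT, maintaining sub = (head type of the part
--     # already built, its suffix [r_i, t_i, r_{i+1}, t_{i+1}, ...]); each relation
--     # is validated against the head type of the already-built tail and the
--     # sequence is assembled back-to-front by prepending.
--     sub = None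
--     ok = True
--     for r in reversed(rels):
--         pair = rel2pair.get(r)
--         if pair is None:
--             ok = False
--             break
--         h, t = pair
--         if sub is not None and sub[0] != t:
--             ok = False
--             break
--         sub = (h, [r, t] + (sub[1] if sub is not None else []))
--     if not ok:
--         return []
--     return [[sub[0]] + sub[1]]
-- ===== Notes on version B (the rewrite author's own statement) =====
-- stated objective: alternative
-- what changed: A iterates left-to-right with a growing accumulator and a running cur_type, validating each link forward and extending the sequence at the end; B traverses the chain right-to-left, carrying (head type, suffix) of the already-built tail, validating each relation against the tail's head type and assembling the sequence back-to-front by prepending.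
import Mathlib
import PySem

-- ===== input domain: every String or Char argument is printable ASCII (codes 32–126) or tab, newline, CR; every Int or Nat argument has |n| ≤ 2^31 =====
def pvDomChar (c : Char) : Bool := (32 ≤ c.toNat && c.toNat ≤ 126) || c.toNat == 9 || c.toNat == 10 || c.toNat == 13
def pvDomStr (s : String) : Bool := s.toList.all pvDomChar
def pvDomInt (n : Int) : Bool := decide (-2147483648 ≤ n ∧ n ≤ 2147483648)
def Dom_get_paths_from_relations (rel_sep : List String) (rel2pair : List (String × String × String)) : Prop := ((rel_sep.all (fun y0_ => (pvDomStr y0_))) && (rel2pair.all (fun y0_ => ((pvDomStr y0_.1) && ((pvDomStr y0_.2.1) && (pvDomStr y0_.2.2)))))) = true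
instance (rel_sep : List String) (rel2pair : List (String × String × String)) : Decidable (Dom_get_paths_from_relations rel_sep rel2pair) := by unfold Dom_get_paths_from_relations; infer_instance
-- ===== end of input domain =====

-- B replaces A's left-to-right loop (accumulator + running cur_type + early returns) by a
-- right-to-left traversal carrying (head type, suffix) of the already-built tail, assembling
-- the sequence back-to-front — an alternative decomposition. Return-value equivalence is proved.

-- ===== PORT A =====
-- A's for-loop with its early returns, as structural recursion over the remaining rels,
-- carrying A's state (seq, cur_type).
def pvLoopA (d : PySem.Dict String (String × String)) :
    List String → List String → String → List (List String)
  | [], seq, _ => [seq]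
  | r :: rs, seq, cur =>
    match d.get? r with
    | none => []
    | some (h, t) => if h ≠ cur then [] else pvLoopA d rs (seq ++ [r, t]) t

def get_paths_from_relations (rel_sep : List String) (rel2pair : List (String × String × String)) : List (List String) :=
  if rel_sep.isEmpty then []
  else
    let rels := rel_sep.map (fun r => PySem.Str.strip r)
    match rels with
    | [] => []  -- unreachable: rel_sep is nonempty here
    | first_rel :: rest =>
      match (PySem.Dict.mk rel2pair).get? first_rel with
      | none => []  -- first_rel not in rel2pair
      | some (head, tail) => pvLoopA (PySem.Dict.mk rel2pair) rest [head, first_rel, tail] tail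

-- ===== PORT B =====
-- B's loop body over reversed(rels); the state is `none` after the `break` (ok = False),
-- `some sub` with sub = none for Python's sub = None, `some (some (h, suffix))` otherwise.
def pvStepB (d : PySem.Dict String (String × String))
    (acc : Option (Option (String × List String))) (r : String) :
    Option (Option (String × List String)) :=
  match acc with
  | none => none  -- after break: remaining iterations do nothing
  | some sub =>
    match d.get? r with
    | none => none  -- pair is None → ok = False, break
    | some (h, t) =>
      match sub with
      | none => some (some (h, [r, t]))
      | some (h', suf) =>
        if h' ≠ t then none  -- sub[0] != t → ok = False, break
        else some (some (h, [r, t] ++ suf))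

def get_paths_from_relations_alt (rel_sep : List String) (rel2pair : List (String × String × String)) : List (List String) :=
  if rel_sep.isEmpty then []
  else
    let rels := rel_sep.map (fun r => PySem.Str.strip r)
    match rels.reverse.foldl (pvStepB (PySem.Dict.mk rel2pair)) (some none) with
    | some (some (h0, suf)) => [h0 :: suf]
    | _ => []  -- ok = False (or, unreachably here, sub still None)

-- ===== PRECONDITION & SPEC =====
def Spec_get_paths_from_relations (rel_sep : List String) (rel2pair : List (String × String × String)) (out : List (List String)) : Prop := out = get_paths_from_relations_alt rel_sep rel2pair
instance (rel_sep : List String) (rel2pair : List (String × String × String)) (out : List (List String)) : Decidable (Spec_get_paths_from_relations rel_sep rel2pair out) := by unfold Spec_get_paths_from_relations; infer_instance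

-- ===== CLAIM (what is proved, stated in full; the proofs are below) =====
def Claim_equal_get_paths_from_relations : Prop := ∀ (rel_sep : List String) (rel2pair : List (String × String × String)), Dom_get_paths_from_relations rel_sep rel2pair → Spec_get_paths_from_relations rel_sep rel2pair (get_paths_from_relations rel_sep rel2pair)

-- ===== LEMMAS AND PROOFS =====

-- proof-only intermediary: the right-recursion both sides are compared against.
-- pvBuild d l = some (head type, suffix) iff l is a nonempty valid chain under d.
def pvBuild (d : PySem.Dict String (String × String)) : List String → Option (String × List String)
  | [] => none
  | r :: rest =>
    match d.get? r with
    | none => none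
    | some (h, t) =>
      match rest with
      | [] => some (h, [r, t])
      | _ :: _ =>
        match pvBuild d rest with
        | none => none
        | some (h', suf) => if h' ≠ t then none else some (h, [r, t] ++ suf)

-- unfolding lemma for pvBuild on a chain of length ≥ 2
theorem pvBuild_cons2 (d : PySem.Dict String (String × String)) (r r2 : String) (rs : List String) :
    pvBuild d (r :: r2 :: rs) =
      (match d.get? r with
       | none => none
       | some (h, t) =>
         match pvBuild d (r2 :: rs) with
         | none => none
         | some (h', suf) => if h' ≠ t then none else some (h, [r, t] ++ suf)) := rfl

-- B's fold over the reversed list computes pvBuild (wrapped one Option deeper).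
theorem pvFoldB_eq_build (d : PySem.Dict String (String × String)) (l : List String) :
    l.reverse.foldl (pvStepB d) (some none) =
      (match l with
       | [] => some none
       | _ :: _ => Option.map some (pvBuild d l)) := by
  induction l with
  | nil => rfl
  | cons r rs ih =>
    simp only [List.reverse_cons, List.foldl_append, List.foldl_cons, List.foldl_nil, ih]
    cases rs with
    | nil =>
      simp only [pvStepB, pvBuild]
      cases d.get? r <;> rfl
    | cons r' rs' =>
      rw [pvBuild_cons2]
      cases hb : pvBuild d (r' :: rs') with
      | none =>
        simp only [hb, Option.map_none, pvStepB]
        cases d.get? r <;> rfl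
      | some q =>
        obtain ⟨h', suf⟩ := q
        simp only [hb, Option.map_some, pvStepB]
        cases d.get? r with
        | none => rfl
        | some p =>
          obtain ⟨h, t⟩ := p
          by_cases ht : h' = t <;> simp [ht]

-- A's loop, started at accumulator acc and current type cur, computes exactly what the
-- right-recursion computes: [] unless pvBuild succeeds with a head type equal to cur,
-- in which case the result is acc extended by the built suffix.
theorem pvLoopA_eq_build (d : PySem.Dict String (String × String)) (rs : List String)
    (acc : List String) (cur : String) :
    pvLoopA d rs acc cur =
      (match rs with
       | [] => [acc]
       | _ :: _ =>
         match pvBuild d rs with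
         | none => []
         | some (h', suf) => if h' = cur then [acc ++ suf] else []) := by
  induction rs generalizing acc cur with
  | nil => rfl
  | cons r rs ih =>
    simp only [pvLoopA, pvBuild]
    cases hg : d.get? r with
    | none => rfl
    | some p =>
      obtain ⟨h, t⟩ := p
      by_cases hc : h = cur
      · subst hc
        simp only [ne_eq, not_true_eq_false, ite_false]
        cases rs with
        | nil => simp [pvLoopA]
        | cons r' rs' =>
          rw [ih]
          cases hb : pvBuild d (r' :: rs') with
          | none => rfl
          | some q =>
            obtain ⟨h', suf⟩ := q
            by_cases ht : h' = t
            · subst ht; simp [List.append_assoc]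
            · simp [ht]
      · simp only [ne_eq, hc, not_false_eq_true, if_pos]
        cases rs with
        | nil => simp [hc]
        | cons r' rs' =>
          cases hb : pvBuild d (r' :: rs') with
          | none => rfl
          | some q =>
            obtain ⟨h', suf⟩ := q
            by_cases ht : h' = t
            · subst ht; simp [hc]
            · simp [ht]

-- ===== VERDICT (by name: the statement is the Claim_ definition above) =====
theorem get_paths_from_relations_spec : Claim_equal_get_paths_from_relations := by
  intro rel_sep rel2pair _
  unfold Spec_get_paths_from_relations get_paths_from_relations get_paths_from_relations_alt
  cases rel_sep with
  | nil => rfl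
  | cons x xs =>
    simp only [List.isEmpty_cons, if_neg (by decide : ¬ (false = true)), List.map_cons]
    rw [pvFoldB_eq_build]
    simp only [pvBuild]
    cases hg : (PySem.Dict.mk rel2pair).get? (PySem.Str.strip x) with
    | none => rfl
    | some p =>
      obtain ⟨head, tail⟩ := p
      dsimp only
      rw [pvLoopA_eq_build]
      cases hxs : xs.map (fun r => PySem.Str.strip r) with
      | nil => rfl
      | cons y ys =>
        cases hb : pvBuild (PySem.Dict.mk rel2pair) (y :: ys) with
        | none => rfl
        | some q =>
          obtain ⟨h', suf⟩ := q
          by_cases ht : h' = tail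
          · subst ht; simp
          · simp [ht]
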